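-- pv_equiv track=rewrite | github.com/tarabrown/grimoire | shelves/scripts/merge_catalog.py | build_title_index_by_media_type
-- ===== SOURCE A (Python) =====
-- VALID_MEDIA_TYPES = {"book", "film", "music"}
--
-- def get_media_type(entry: dict) -> str:
--     """Get the media_type of an entry, defaulting to 'book' for backward compatibility."""
--     mt = entry.get("media_type", "book")
--     return mt if mt in VALID_MEDIA_TYPES else "book"
--
-- def build_title_index_by_media_type(catalog: list[dict]) -> dict[str, list[str]]:
--     """Build a dict mapping media_type -> list of titles for dedup scoping."""
--     index: dict[str, list[str]] = {"book": [], "film": [], "music": []}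
--     for entry in catalog:
--         mt = get_media_type(entry)
--         title = entry.get("title", "")
--         if title:
--             index[mt].append(title)
--     return index
-- ===== SOURCE B (Python) =====
-- VALID_MEDIA_TYPES = {"book", "film", "music"}
--
-- def get_media_type(entry: dict) -> str:
--     mt = entry.get("media_type", "book")
--     return mt if mt in VALID_MEDIA_TYPES else "book"
--
-- def build_title_index_by_media_type(catalog: list[dict]) -> dict[str, list[str]]:
--     """Per-type filtering passes instead of one dispatch loop with bucket state."""
--     return {mt: [t for entry in catalog
--                  if get_media_type(entry) == mt and (t := entry.get("title", ""))]
--             for mt in ("book", "film", "music")}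
-- ===== Notes on version B (the rewrite author's own statement) =====
-- stated objective: idiomatic
-- what changed: Replaces the single dispatch loop that routes each entry into mutable per-type buckets with a dict comprehension that makes one independent filtering pass over the catalog per media type, keeping no running state.
import Mathlib
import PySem

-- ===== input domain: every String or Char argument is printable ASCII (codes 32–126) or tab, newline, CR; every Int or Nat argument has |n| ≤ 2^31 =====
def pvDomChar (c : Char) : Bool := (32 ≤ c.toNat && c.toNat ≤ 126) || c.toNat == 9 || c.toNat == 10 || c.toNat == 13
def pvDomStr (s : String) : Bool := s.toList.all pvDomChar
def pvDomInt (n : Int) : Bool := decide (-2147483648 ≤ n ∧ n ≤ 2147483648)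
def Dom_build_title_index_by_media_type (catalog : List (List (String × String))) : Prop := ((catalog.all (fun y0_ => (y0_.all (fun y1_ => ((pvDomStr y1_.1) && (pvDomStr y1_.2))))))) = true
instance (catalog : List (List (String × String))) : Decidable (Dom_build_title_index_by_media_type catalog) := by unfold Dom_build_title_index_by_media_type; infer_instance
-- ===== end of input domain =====

-- B replaces A's single dispatch loop over mutable per-type buckets with one
-- independent filtering pass per media type (idiomatic dict comprehension; same cost).


-- ===== PORT A =====
-- module helper get_media_type, used by both Pythons
def pvGetMediaType (entry : List (String × String)) : String :=
  let mt := (PySem.Dict.mk entry).getD "media_type" "book"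
  if mt = "book" ∨ mt = "film" ∨ mt = "music" then mt else "book"

-- the body of A's for-loop: route entry's title into the bucket of its media type
def pvStep (index : PySem.Dict String (List String)) (entry : List (String × String)) :
    PySem.Dict String (List String) :=
  let mt := pvGetMediaType entry
  let title := (PySem.Dict.mk entry).getD "title" ""
  if title ≠ "" then index.modify mt [] (fun l => l ++ [title]) else index

def build_title_index_by_media_type (catalog : List (List (String × String))) : List (String × List String) :=
  (catalog.foldl pvStep (PySem.Dict.mk [("book", []), ("film", []), ("music", [])])).items

-- ===== PORT B =====
-- the comprehension's per-entry test: keep entry's title iff its media type is mt and the title is truthy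
def pvPick (mt : String) (entry : List (String × String)) : Option String :=
  if pvGetMediaType entry = mt then
    let t := (PySem.Dict.mk entry).getD "title" ""
    if t ≠ "" then some t else none
  else none

def build_title_index_by_media_type_alt (catalog : List (List (String × String))) : List (String × List String) :=
  ["book", "film", "music"].map (fun mt => (mt, catalog.filterMap (pvPick mt)))

-- ===== PRECONDITION & SPEC =====
def Spec_build_title_index_by_media_type (catalog : List (List (String × String))) (out : List (String × List String)) : Prop := out = build_title_index_by_media_type_alt catalog
instance (catalog : List (List (String × String))) (out : List (String × List String)) : Decidable (Spec_build_title_index_by_media_type catalog out) := by unfold Spec_build_title_index_by_media_type; infer_instance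

-- ===== CLAIM (what is proved, stated in full; the proofs are below) =====
def Claim_equal_build_title_index_by_media_type : Prop := ∀ (catalog : List (List (String × String))), Dom_build_title_index_by_media_type catalog → Spec_build_title_index_by_media_type catalog (build_title_index_by_media_type catalog)

-- ===== LEMMAS AND PROOFS =====
-- get_media_type always returns one of the three valid types
lemma pvGetMediaType_cases (entry : List (String × String)) :
    pvGetMediaType entry = "book" ∨ pvGetMediaType entry = "film" ∨ pvGetMediaType entry = "music" := by
  by_cases h : (PySem.Dict.mk entry).getD "media_type" "book" = "book" ∨
      (PySem.Dict.mk entry).getD "media_type" "book" = "film" ∨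
      (PySem.Dict.mk entry).getD "media_type" "book" = "music"
  · rw [pvGetMediaType]
    simp only [if_pos h]
    exact h
  · simp [pvGetMediaType, h]

-- loop invariant: A's fold from any 3-bucket state appends exactly B's per-type filters
lemma fold_eq_filters (catalog : List (List (String × String))) (b f m : List String) :
    catalog.foldl pvStep (PySem.Dict.mk [("book", b), ("film", f), ("music", m)]) =
    PySem.Dict.mk [("book", b ++ catalog.filterMap (pvPick "book")),
                   ("film", f ++ catalog.filterMap (pvPick "film")),
                   ("music", m ++ catalog.filterMap (pvPick "music"))] := by
  induction catalog generalizing b f m with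
  | nil => simp
  | cons e rest ih =>
    rw [List.foldl_cons]
    by_cases ht : (PySem.Dict.mk e).getD "title" "" = ""
    · have hstep : pvStep (PySem.Dict.mk [("book", b), ("film", f), ("music", m)]) e =
          PySem.Dict.mk [("book", b), ("film", f), ("music", m)] := by
        simp [pvStep, ht]
      have hp : ∀ mt, pvPick mt e = none := by
        intro mt; unfold pvPick; split <;> simp [ht]
      rw [hstep, ih]
      simp [hp]
    · rcases pvGetMediaType_cases e with hm | hm | hm
      · have hstep : pvStep (PySem.Dict.mk [("book", b), ("film", f), ("music", m)]) e =
            PySem.Dict.mk [("book", b ++ [(PySem.Dict.mk e).getD "title" ""]), ("film", f), ("music", m)] := by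
          simp [pvStep, hm, PySem.Dict.modify, PySem.Dict.insert, PySem.Dict.getD,
                PySem.Dict.get?, PySem.Dict.contains]
          simpa [PySem.Dict.getD, PySem.Dict.get?] using ht
        rw [hstep, ih]
        simp [pvPick, hm, ht]
      · have hstep : pvStep (PySem.Dict.mk [("book", b), ("film", f), ("music", m)]) e =
            PySem.Dict.mk [("book", b), ("film", f ++ [(PySem.Dict.mk e).getD "title" ""]), ("music", m)] := by
          simp [pvStep, hm, PySem.Dict.modify, PySem.Dict.insert, PySem.Dict.getD,
                PySem.Dict.get?, PySem.Dict.contains]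
          simpa [PySem.Dict.getD, PySem.Dict.get?] using ht
        rw [hstep, ih]
        simp [pvPick, hm, ht]
      · have hstep : pvStep (PySem.Dict.mk [("book", b), ("film", f), ("music", m)]) e =
            PySem.Dict.mk [("book", b), ("film", f), ("music", m ++ [(PySem.Dict.mk e).getD "title" ""])] := by
          simp [pvStep, hm, PySem.Dict.modify, PySem.Dict.insert, PySem.Dict.getD,
                PySem.Dict.get?, PySem.Dict.contains]
          simpa [PySem.Dict.getD, PySem.Dict.get?] using ht
        rw [hstep, ih]
        simp [pvPick, hm, ht]

-- ===== VERDICT (by name: the statement is the Claim_ definition above) =====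
theorem build_title_index_by_media_type_spec : Claim_equal_build_title_index_by_media_type := by
  intro catalog _
  show _ = _
  unfold build_title_index_by_media_type build_title_index_by_media_type_alt
  rw [fold_eq_filters]
  simp
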